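-- pv_equiv track=rewrite | github.com/YASER20001/data-work | backend/rag/rag_service.py | deduplicate_snippets
-- ===== SOURCE A (Python) =====
-- from typing import List, Dict, Any, Optional
--
-- def deduplicate_snippets(snippets: List[str], max_chars: int = 2000) -> List[str]:
--     """
--     Remove near-duplicate snippets and enforce a total character budget.
--
--     Two snippets are considered duplicates if their first 60 characters
--     overlap. Stops adding snippets once the total budget is exceeded.
--     """
--     seen_prefixes: List[str] = []
--     deduped: List[str] = []
--     total = 0
--
--     for s in snippets:
--         if not s.strip():
--             continue
--         prefix = s[:80].lower().strip()
--         if any(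
--             prefix.startswith(p[:60]) or p.startswith(prefix[:60])
--             for p in seen_prefixes
--         ):
--             continue
--         seen_prefixes.append(prefix)
--         if total + len(s) > max_chars:
--             break
--         deduped.append(s)
--         total += len(s)
--
--     return deduped
-- ===== SOURCE B (Python) =====
-- def deduplicate_snippets(snippets, max_chars=2000):
--     """Two staged passes instead of one fused loop: pass 1 drops blanks and
--     prefix-duplicates using hash-set lookups (every prefix of each accepted
--     60-char key, plus the keys themselves) so no scan over earlier snippets;
--     pass 2 applies the character budget to the surviving candidates."""
--     seen_any = set()   # every prefix of every accepted 60-char key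
--     seen_full = set()  # the accepted keys themselves
--     candidates = []
--     for s in snippets:
--         if not s.strip():
--             continue
--         key = s[:80].lower().strip()[:60]
--         if key in seen_any or any(key[:i] in seen_full for i in range(len(key))):
--             continue
--         for i in range(len(key) + 1):
--             seen_any.add(key[:i])
--         seen_full.add(key)
--         candidates.append(s)
--     deduped = []
--     total = 0
--     for s in candidates:
--         if total + len(s) > max_chars:
--             break
--         deduped.append(s)
--         total += len(s)
--     return deduped
-- ===== Notes on version B (the rewrite author's own statement) =====
-- stated objective: faster
-- what changed: Restructures A's single fused loop into two staged passes: pass 1 filters blanks and prefix-duplicates using two hash sets (every prefix of each accepted 60-char key, and the keys themselves) instead of A's inner scan over all previously seen prefixes, and pass 2 applies the character budget to the surviving candidates.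
import Mathlib
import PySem

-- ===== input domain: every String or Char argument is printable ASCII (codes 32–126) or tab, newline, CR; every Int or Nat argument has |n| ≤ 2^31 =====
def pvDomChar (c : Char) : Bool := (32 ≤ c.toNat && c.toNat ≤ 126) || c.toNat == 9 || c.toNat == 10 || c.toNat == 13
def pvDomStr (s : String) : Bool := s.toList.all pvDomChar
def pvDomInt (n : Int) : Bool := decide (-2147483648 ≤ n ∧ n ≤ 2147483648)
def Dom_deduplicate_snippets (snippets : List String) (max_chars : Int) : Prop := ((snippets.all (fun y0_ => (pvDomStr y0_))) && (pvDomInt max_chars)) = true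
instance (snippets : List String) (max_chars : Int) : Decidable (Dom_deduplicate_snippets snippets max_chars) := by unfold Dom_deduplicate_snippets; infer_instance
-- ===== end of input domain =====

-- B splits A's single fused loop into two staged passes — pass 1 removes blanks and
-- prefix-duplicates via hash-set lookups (no scan over earlier snippets), pass 2 applies
-- the character budget to the surviving candidates (objective: faster).

-- ===== PORT A =====
-- A's loop: seen_prefixes grows, 'continue' skips, 'break' returns the list built so far.
def pvDedupA (snippets : List String) (seen : List (List Char)) (ded : List String)
    (total : Int) (max_chars : Int) : List String :=
  match snippets with
  | [] => ded
  | s :: rest =>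
    if PySem.Chars.strip s.toList = [] then
      pvDedupA rest seen ded total max_chars
    else
      let pfx := PySem.Chars.strip (PySem.Chars.lower (PySem.List.slice s.toList none (some 80)))
      if seen.any (fun p =>
          PySem.Chars.startswith pfx (PySem.List.slice p none (some 60)) ||
          PySem.Chars.startswith p (PySem.List.slice pfx none (some 60))) then
        pvDedupA rest seen ded total max_chars
      else
        let seen' := seen ++ [pfx]
        if total + PySem.Str.len s > max_chars then ded
        else pvDedupA rest seen' (ded ++ [s]) (total + PySem.Str.len s) max_chars

def deduplicate_snippets (snippets : List String) (max_chars : Int) : List String :=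
  pvDedupA snippets [] [] 0 max_chars

-- ===== PORT B =====
-- pass 1: keep the non-blank, non-duplicate snippets; seenAny = every prefix of every
-- accepted 60-char key, seenFull = the accepted keys themselves.
def pvPhase1 (snippets : List String) (seenAny seenFull : PySem.Set (List Char)) : List String :=
  match snippets with
  | [] => []
  | s :: rest =>
    if PySem.Chars.strip s.toList = [] then
      pvPhase1 rest seenAny seenFull
    else
      let key := PySem.List.slice
        (PySem.Chars.strip (PySem.Chars.lower (PySem.List.slice s.toList none (some 80))))
        none (some 60)
      if PySem.Set.contains seenAny key ||
          (PySem.List.pyRange 0 (key.length : Int) 1).any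
            (fun i => PySem.Set.contains seenFull (PySem.List.slice key none (some i))) then
        pvPhase1 rest seenAny seenFull
      else
        s :: pvPhase1 rest
          ((PySem.List.pyRange 0 ((key.length : Int) + 1) 1).foldl
            (fun st i => PySem.Set.add st (PySem.List.slice key none (some i))) seenAny)
          (PySem.Set.add seenFull key)

-- pass 2: take candidates while the running character total stays within budget.
def pvPhase2 (cands : List String) (total max_chars : Int) : List String :=
  match cands with
  | [] => []
  | s :: rest =>
    if total + PySem.Str.len s > max_chars then []
    else s :: pvPhase2 rest (total + PySem.Str.len s) max_chars

def deduplicate_snippets_alt (snippets : List String) (max_chars : Int) : List String :=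
  pvPhase2 (pvPhase1 snippets PySem.Set.empty PySem.Set.empty) 0 max_chars

-- ===== PRECONDITION & SPEC =====
def Spec_deduplicate_snippets (snippets : List String) (max_chars : Int) (out : List String) : Prop := out = deduplicate_snippets_alt snippets max_chars
instance (snippets : List String) (max_chars : Int) (out : List String) : Decidable (Spec_deduplicate_snippets snippets max_chars out) := by unfold Spec_deduplicate_snippets; infer_instance

-- ===== CLAIM (what is proved, stated in full; the proofs are below) =====
def Claim_equal_deduplicate_snippets : Prop := ∀ (snippets : List String) (max_chars : Int), Dom_deduplicate_snippets snippets max_chars → Spec_deduplicate_snippets snippets max_chars (deduplicate_snippets snippets max_chars)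

-- ===== LEMMAS AND PROOFS =====

-- s[:60] on List Char is take 60
lemma pv_slice60 (t : List Char) : PySem.List.slice t none (some 60) = t.take 60 := by
  have h := PySem.List.slice_to t (b := 60) (by norm_num)
  norm_num at h
  exact h

-- s[:i] for 0 ≤ i is take i.toNat
lemma pv_slice_to_take (t : List Char) (i : Int) (hi : 0 ≤ i) :
    PySem.List.slice t none (some i) = t.take i.toNat :=
  PySem.List.slice_to t hi

-- a prefix q with |q| ≤ 60 sits inside s iff it sits inside s.take 60
lemma pv_prefix_take60 (q s : List Char) (hq : q.length ≤ 60) : q <+: s.take 60 ↔ q <+: s := by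
  rw [List.prefix_take_iff]
  exact and_iff_left hq

-- the prefixes of k are exactly its takes at indices 0 .. |k|
lemma pv_prefix_iff_take (q k : List Char) :
    q <+: k ↔ ∃ i : Int, 0 ≤ i ∧ i < (k.length : Int) + 1 ∧ q = k.take i.toNat := by
  constructor
  · rintro ⟨t, rfl⟩
    refine ⟨(q.length : Int), by positivity, ?_, by simp⟩
    simp only [List.length_append]
    push_cast
    omega
  · rintro ⟨i, _, _, rfl⟩
    exact List.take_prefix _ _

-- the dup tests of A and of B agree whenever the two sets describe the seen list
lemma pv_test_equiv (pfx : List Char) (seen : List (List Char))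
    (seenAny seenFull : PySem.Set (List Char))
    (hAny : ∀ x, x ∈ seenAny ↔ ∃ p ∈ seen, x <+: p.take 60)
    (hFull : ∀ x, x ∈ seenFull ↔ ∃ p ∈ seen, x = p.take 60) :
    (seen.any (fun p =>
        PySem.Chars.startswith pfx (p.take 60) ||
        PySem.Chars.startswith p (pfx.take 60))) =
    (PySem.Set.contains seenAny (pfx.take 60) ||
      (PySem.List.pyRange 0 (((pfx.take 60).length : Int)) 1).any
        (fun i => PySem.Set.contains seenFull
          (PySem.List.slice (pfx.take 60) none (some i)))) := by
  apply Bool.coe_iff_coe.mp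
  simp only [List.any_eq_true, Bool.or_eq_true, PySem.Set.contains_iff,
    PySem.Chars.startswith_iff, PySem.List.mem_pyRange_one, hAny, hFull]
  constructor
  · rintro ⟨p, hp, hcase⟩
    rcases hcase with h1 | h2
    · -- p.take 60 <+: pfx, hence p.take 60 <+: pfx.take 60
      have hkpk : p.take 60 <+: pfx.take 60 :=
        (pv_prefix_take60 (p.take 60) pfx (by simp)).mpr h1
      by_cases hlen : (pfx.take 60).length ≤ (p.take 60).length
      · -- equal keys: pfx.take 60 <+: p.take 60, hence ∈ seenAny
        left
        exact ⟨p, hp, (hkpk.eq_of_length_le hlen) ▸ List.prefix_refl _⟩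
      · -- proper prefix: its length is one of the scanned indices
        right
        refine ⟨((p.take 60).length : Int),
          ⟨by positivity, by exact_mod_cast Nat.lt_of_not_le hlen⟩, p, hp, ?_⟩
        rw [pv_slice_to_take _ _ (by positivity), Int.toNat_natCast]
        exact (List.prefix_iff_eq_take.mp hkpk).symm
    · -- pfx.take 60 <+: p, hence pfx.take 60 <+: p.take 60, ∈ seenAny
      exact Or.inl ⟨p, hp, (pv_prefix_take60 (pfx.take 60) p (by simp)).mpr h2⟩
  · rintro (⟨p, hp, hkkp⟩ | ⟨i, ⟨hi0, hil⟩, p, hp, heq⟩)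
    · -- pfx.take 60 <+: p.take 60 ⇒ pfx.take 60 <+: p ⇒ A's second test
      exact ⟨p, hp, Or.inr ((pv_prefix_take60 (pfx.take 60) p (by simp)).mp hkkp)⟩
    · -- p.take 60 = (pfx.take 60)[:i] ⇒ p.take 60 <+: pfx ⇒ A's first test
      rw [pv_slice_to_take _ _ hi0] at heq
      refine ⟨p, hp, Or.inl ?_⟩
      have hpre : p.take 60 <+: pfx.take 60 := by
        rw [← heq]
        exact List.take_prefix _ _
      exact (pv_prefix_take60 (p.take 60) pfx (by simp)).mp hpre

-- main invariant: A's fused loop equals prefix 'ded' plus budgeting B's candidate list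
lemma pv_loop_eq (snippets : List String) (seen : List (List Char))
    (seenAny seenFull : PySem.Set (List Char)) (ded : List String) (total max_chars : Int)
    (hAny : ∀ x, x ∈ seenAny ↔ ∃ p ∈ seen, x <+: p.take 60)
    (hFull : ∀ x, x ∈ seenFull ↔ ∃ p ∈ seen, x = p.take 60) :
    pvDedupA snippets seen ded total max_chars =
    ded ++ pvPhase2 (pvPhase1 snippets seenAny seenFull) total max_chars := by
  induction snippets generalizing seen seenAny seenFull ded total with
  | nil => simp [pvDedupA, pvPhase1, pvPhase2]
  | cons s rest ih =>
    simp only [pvDedupA, pvPhase1, pv_slice60]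
    by_cases hblank : PySem.Chars.strip s.toList = []
    · rw [if_pos hblank, if_pos hblank]
      exact ih seen seenAny seenFull ded total hAny hFull
    · rw [if_neg hblank, if_neg hblank]
      set pfx := PySem.Chars.strip (PySem.Chars.lower (PySem.List.slice s.toList none (some 80))) with hpfx
      rw [← pv_test_equiv pfx seen seenAny seenFull hAny hFull]
      by_cases hdup : (seen.any (fun p =>
          PySem.Chars.startswith pfx (p.take 60) ||
          PySem.Chars.startswith p (pfx.take 60))) = true
      · rw [if_pos hdup, if_pos hdup]
        exact ih seen seenAny seenFull ded total hAny hFull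
      · rw [if_neg hdup, if_neg hdup]
        have hAny' : ∀ x, x ∈ ((PySem.List.pyRange 0 (((pfx.take 60).length : Int) + 1) 1).foldl
            (fun st i => PySem.Set.add st (PySem.List.slice (pfx.take 60) none (some i))) seenAny) ↔
            ∃ p ∈ seen ++ [pfx], x <+: p.take 60 := by
          intro x
          rw [PySem.Set.mem_foldl_add]
          constructor
          · rintro (hx | ⟨i, hi, rfl⟩)
            · obtain ⟨p, hp, hpx⟩ := (hAny x).mp hx
              exact ⟨p, List.mem_append_left _ hp, hpx⟩
            · obtain ⟨hi0, _⟩ := PySem.List.mem_pyRange_one.mp hi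
              refine ⟨pfx, List.mem_append_right _ (List.mem_singleton.mpr rfl), ?_⟩
              rw [pv_slice_to_take _ i hi0]
              exact (List.take_prefix _ _).trans (by simp)
          · rintro ⟨p, hp, hpx⟩
            rcases List.mem_append.mp hp with hp | hp
            · exact Or.inl ((hAny x).mpr ⟨p, hp, hpx⟩)
            · rw [List.mem_singleton.mp hp] at hpx
              right
              obtain ⟨i, hi0, hil, rfl⟩ := (pv_prefix_iff_take x (pfx.take 60)).mp hpx
              exact ⟨i, PySem.List.mem_pyRange_one.mpr ⟨hi0, hil⟩,
                (pv_slice_to_take _ i hi0).symm⟩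
        have hFull' : ∀ x, x ∈ PySem.Set.add seenFull (pfx.take 60) ↔
            ∃ p ∈ seen ++ [pfx], x = p.take 60 := by
          intro x
          rw [PySem.Set.mem_add]
          constructor
          · rintro (hx | rfl)
            · obtain ⟨p, hp, hpx⟩ := (hFull x).mp hx
              exact ⟨p, List.mem_append_left _ hp, hpx⟩
            · exact ⟨pfx, List.mem_append_right _ (List.mem_singleton.mpr rfl), rfl⟩
          · rintro ⟨p, hp, hpx⟩
            rcases List.mem_append.mp hp with hp | hp
            · exact Or.inl ((hFull x).mpr ⟨p, hp, hpx⟩)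
            · rw [List.mem_singleton.mp hp] at hpx
              exact Or.inr hpx
        rw [pvPhase2]
        by_cases hbudget : total + PySem.Str.len s > max_chars
        · rw [if_pos hbudget, if_pos hbudget]
          simp
        · rw [if_neg hbudget, if_neg hbudget]
          rw [ih (seen ++ [pfx]) _ _ (ded ++ [s]) (total + PySem.Str.len s) hAny' hFull']
          simp

-- ===== VERDICT (by name: the statement is the Claim_ definition above) =====
theorem deduplicate_snippets_spec : Claim_equal_deduplicate_snippets := by
  intro snippets max_chars _
  unfold Spec_deduplicate_snippets deduplicate_snippets deduplicate_snippets_alt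
  exact pv_loop_eq snippets [] PySem.Set.empty PySem.Set.empty [] 0 max_chars
    (by simp [PySem.Set.empty]) (by simp [PySem.Set.empty])
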